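-- pv_equiv track=rewrite | github.com/jhsol24/TIL | Algorithm_Study/BOJ/0202_Greedy_algorithm_수_묶기_sol2.py | multi_sum
-- ===== SOURCE A (Python) =====
-- def multi_sum(lst, answer):
--     if len(lst) % 2 == 1:
--         for x in range(0, len(lst) - 1, 2):
--             answer += (lst[x] * lst[x + 1])
--         answer += lst[-1]
--     else:
--         for y in range(0, len(lst), 2):
--             answer += (lst[y] * lst[y + 1])
--     return answer
-- ===== SOURCE B (Python) =====
-- def multi_sum(lst, answer):
--     # One pass with a pending operand: pair up consecutive elements as they
--     # stream by (no index arithmetic, no even/odd branch on the length).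
--     pending = None
--     for v in lst:
--         if pending is None:
--             pending = v
--         else:
--             answer += pending * v
--             pending = None
--     if pending is not None:
--         answer += pending
--     return answer
-- ===== Notes on version B (the rewrite author's own statement) =====
-- stated objective: alternative
-- what changed: Replaces the length-parity branch with two index-stepping range loops by a single streaming pass that keeps a 'pending' operand and multiplies it with the next element, handling an unpaired tail uniformly.
import Mathlib
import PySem

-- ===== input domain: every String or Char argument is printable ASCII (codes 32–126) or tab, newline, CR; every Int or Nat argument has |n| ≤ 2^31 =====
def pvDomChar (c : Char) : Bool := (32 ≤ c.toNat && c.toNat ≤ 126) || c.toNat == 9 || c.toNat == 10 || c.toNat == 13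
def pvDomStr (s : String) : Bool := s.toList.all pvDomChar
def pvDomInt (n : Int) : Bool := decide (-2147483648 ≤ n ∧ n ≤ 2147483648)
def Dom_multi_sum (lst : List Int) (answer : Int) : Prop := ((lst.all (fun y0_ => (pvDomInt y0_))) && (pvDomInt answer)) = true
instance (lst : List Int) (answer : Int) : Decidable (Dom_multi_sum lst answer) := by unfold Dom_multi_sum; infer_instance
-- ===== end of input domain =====

-- B replaces A's length-parity branch with index-stepping range loops by a single
-- streaming pass carrying a pending operand (alternative decomposition, same cost).


-- ===== PORT A =====
-- lst[x] / lst[x+1] / lst[-1] ported as pyGetD: every index A uses is in range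
def multi_sum (lst : List Int) (answer : Int) : Int :=
  if (lst.length : Int) % 2 == 1 then
    ((PySem.List.pyRange 0 ((lst.length : Int) - 1) 2).foldl
      (fun acc x => acc + PySem.List.pyGetD lst x 0 * PySem.List.pyGetD lst (x + 1) 0) answer)
      + PySem.List.pyGetD lst (-1) 0
  else
    (PySem.List.pyRange 0 (lst.length : Int) 2).foldl
      (fun acc y => acc + PySem.List.pyGetD lst y 0 * PySem.List.pyGetD lst (y + 1) 0) answer

-- ===== PORT B =====
-- the loop body: 'pending' is the state component, updated exactly as in Source B
def multiAltStep (st : Int × Option Int) (v : Int) : Int × Option Int :=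
  match st.2 with
  | none => (st.1, some v)
  | some p => (st.1 + p * v, none)

def multi_sum_alt (lst : List Int) (answer : Int) : Int :=
  let st := lst.foldl multiAltStep (answer, none)
  st.1 + (match st.2 with | some p => p | none => 0)

-- ===== PRECONDITION & SPEC =====
def Spec_multi_sum (lst : List Int) (answer : Int) (out : Int) : Prop := out = multi_sum_alt lst answer
instance (lst : List Int) (answer : Int) (out : Int) : Decidable (Spec_multi_sum lst answer out) := by unfold Spec_multi_sum; infer_instance

-- ===== CLAIM (what is proved, stated in full; the proofs are below) =====
def Claim_equal_multi_sum : Prop := ∀ (lst : List Int) (answer : Int), Dom_multi_sum lst answer → Spec_multi_sum lst answer (multi_sum lst answer)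

-- ===== LEMMAS AND PROOFS =====

-- the common semantics: sum of products of consecutive pairs, unpaired tail added as-is
def pairSum : List Int → Int
  | [] => 0
  | [a] => a
  | a :: b :: t => a * b + pairSum t

theorem alt_eq_pairSum : ∀ (lst : List Int) (ans : Int), multi_sum_alt lst ans = ans + pairSum lst
  | [], ans => by simp [multi_sum_alt, pairSum]
  | [a], ans => by simp [multi_sum_alt, multiAltStep, pairSum]
  | a :: b :: t, ans => by
    have h := alt_eq_pairSum t (ans + a * b)
    simp only [multi_sum_alt, List.foldl_cons, multiAltStep, pairSum] at h ⊢
    rw [h]; ring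

theorem pyRange_two (m : Nat) :
    PySem.List.pyRange 0 (2 * (m : Int)) 2 = (List.range m).map (fun (k : Nat) => 2 * (k : Int)) := by
  rw [PySem.List.pyRange_of_pos 0 (2 * (m : Int)) (by norm_num)]
  have hc : (if (0 : Int) < 2 * (m : Int) then ((2 * (m : Int) - 0 + 2 - 1) / 2).toNat else 0) = m := by
    split_ifs <;> omega
  rw [hc]
  exact List.map_congr_left (fun k _ => by ring)

theorem getD_pair_shift (a b x : Int) (t : List Int) (k : Nat) :
    PySem.List.pyGetD (a :: b :: t) (2 * ((k + 1 : Nat) : Int)) x *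
      PySem.List.pyGetD (a :: b :: t) (2 * ((k + 1 : Nat) : Int) + 1) x
    = PySem.List.pyGetD t (2 * (k : Int)) x * PySem.List.pyGetD t (2 * (k : Int) + 1) x := by
  have e1 : (2 * ((k + 1 : Nat) : Int)) = ((2 * k + 2 : Nat) : Int) := by push_cast; ring
  have e2 : (2 * ((k + 1 : Nat) : Int) + 1) = ((2 * k + 3 : Nat) : Int) := by push_cast; ring
  have e3 : (2 * (k : Int)) = ((2 * k : Nat) : Int) := by push_cast; ring
  have e4 : (2 * (k : Int) + 1) = ((2 * k + 1 : Nat) : Int) := by push_cast; ring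
  rw [e2, e1, e4, e3, PySem.List.pyGetD_natCast, PySem.List.pyGetD_natCast,
    PySem.List.pyGetD_natCast, PySem.List.pyGetD_natCast]
  rw [show 2 * k + 2 = (2 * k) + 1 + 1 from by omega,
    show 2 * k + 3 = (2 * k + 1) + 1 + 1 from by omega]
  simp [List.getD]

theorem getD_pair_zero (a b x : Int) (t : List Int) :
    PySem.List.pyGetD (a :: b :: t) (2 * ((0 : Nat) : Int)) x *
      PySem.List.pyGetD (a :: b :: t) (2 * ((0 : Nat) : Int) + 1) x = a * b := by
  have e0 : (2 * ((0 : Nat) : Int)) = ((0 : Nat) : Int) := by norm_num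
  have e1 : (2 * ((0 : Nat) : Int) + 1) = ((1 : Nat) : Int) := by norm_num
  rw [e1, e0, PySem.List.pyGetD_natCast, PySem.List.pyGetD_natCast]
  rfl

theorem evenSum : ∀ (lst : List Int) (m : Nat), lst.length = 2 * m →
    ((List.range m).map (fun (k : Nat) =>
      PySem.List.pyGetD lst (2 * (k : Int)) 0 * PySem.List.pyGetD lst (2 * (k : Int) + 1) 0)).sum
      = pairSum lst
  | [], m, h => by
    have hm : m = 0 := by simp at h; omega
    subst hm; simp [pairSum]
  | [a], m, h => by simp at h; omega
  | a :: b :: t, m, h => by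
    have hm : ∃ m', m = m' + 1 := by
      rcases m with _ | m'
      · simp at h
      · exact ⟨m', rfl⟩
    obtain ⟨m', rfl⟩ := hm
    have ht : t.length = 2 * m' := by simp at h; omega
    have ih := evenSum t m' ht
    rw [List.range_succ_eq_map]
    simp only [List.map_cons, List.map_map, List.sum_cons, Function.comp_def, Nat.succ_eq_add_one]
    rw [getD_pair_zero]
    have hmaps :
        (List.map (fun (k : Nat) => PySem.List.pyGetD (a :: b :: t) (2 * ((k + 1 : Nat) : Int)) 0 *
          PySem.List.pyGetD (a :: b :: t) (2 * ((k + 1 : Nat) : Int) + 1) 0) (List.range m')).sum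
        = (List.map (fun (k : Nat) => PySem.List.pyGetD t (2 * (k : Int)) 0 *
            PySem.List.pyGetD t (2 * (k : Int) + 1) 0) (List.range m')).sum :=
      congrArg List.sum (List.map_congr_left (fun k _ => getD_pair_shift a b 0 t k))
    rw [hmaps, ih]
    simp [pairSum]

theorem oddSum : ∀ (lst : List Int) (m : Nat), lst.length = 2 * m + 1 → ∀ (hne : lst ≠ []),
    ((List.range m).map (fun (k : Nat) =>
      PySem.List.pyGetD lst (2 * (k : Int)) 0 * PySem.List.pyGetD lst (2 * (k : Int) + 1) 0)).sum
      + lst.getLast hne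
      = pairSum lst
  | [], m, h, hne => by simp at h
  | [a], m, h, hne => by
    have hm : m = 0 := by simpa using h
    subst hm; simp [pairSum]
  | a :: b :: t, m, h, hne => by
    have hm : ∃ m', m = m' + 1 := by
      rcases m with _ | m'
      · simp at h
      · exact ⟨m', rfl⟩
    obtain ⟨m', rfl⟩ := hm
    have ht : t.length = 2 * m' + 1 := by simp at h; omega
    have htne : t ≠ [] := by intro h'; rw [h'] at ht; simp at ht
    have ih := oddSum t m' ht htne
    rw [List.range_succ_eq_map]
    simp only [List.map_cons, List.map_map, List.sum_cons, Function.comp_def, Nat.succ_eq_add_one]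
    rw [getD_pair_zero]
    have hmaps :
        (List.map (fun (k : Nat) => PySem.List.pyGetD (a :: b :: t) (2 * ((k + 1 : Nat) : Int)) 0 *
          PySem.List.pyGetD (a :: b :: t) (2 * ((k + 1 : Nat) : Int) + 1) 0) (List.range m')).sum
        = (List.map (fun (k : Nat) => PySem.List.pyGetD t (2 * (k : Int)) 0 *
            PySem.List.pyGetD t (2 * (k : Int) + 1) 0) (List.range m')).sum :=
      congrArg List.sum (List.map_congr_left (fun k _ => getD_pair_shift a b 0 t k))
    have hlast : (a :: b :: t).getLast hne = t.getLast htne := by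
      rw [List.getLast_cons (by simp), List.getLast_cons htne]
    rw [hmaps, hlast, add_assoc, ih]
    simp [pairSum]

theorem a_eq_pairSum (lst : List Int) (answer : Int) : multi_sum lst answer = answer + pairSum lst := by
  unfold multi_sum
  by_cases hodd : (lst.length : Int) % 2 = 1
  · obtain ⟨m, hm⟩ : ∃ m : Nat, lst.length = 2 * m + 1 := ⟨lst.length / 2, by omega⟩
    have hne : lst ≠ [] := by intro h; subst h; simp at hm
    simp only [hodd, beq_self_eq_true, if_true]
    rw [hm]
    have hrange : ((2 * m + 1 : Nat) : Int) - 1 = 2 * (m : Int) := by push_cast; ring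
    rw [hrange, pyRange_two, PySem.List.foldl_add, List.map_map]
    rw [PySem.List.pyGetD_neg_one lst 0 hne]
    have hs := oddSum lst m hm hne
    simp only [Function.comp_def] at hs ⊢
    omega
  · obtain ⟨m, hm⟩ : ∃ m : Nat, lst.length = 2 * m := ⟨lst.length / 2, by omega⟩
    have hif : (((lst.length : Int) % 2) == 1) = false := by simpa using hodd
    rw [hif]
    simp only [Bool.false_eq_true, if_false]
    rw [hm]
    have hrange : ((2 * m : Nat) : Int) = 2 * (m : Int) := by push_cast; ring
    rw [hrange, pyRange_two, PySem.List.foldl_add, List.map_map]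
    have hs := evenSum lst m hm
    simp only [Function.comp_def] at hs ⊢
    omega

-- ===== VERDICT (by name: the statement is the Claim_ definition above) =====
theorem multi_sum_spec : Claim_equal_multi_sum := by
  intro lst answer _
  unfold Spec_multi_sum
  rw [a_eq_pairSum, alt_eq_pairSum]
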